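-- pv_equiv track=rewrite | github.com/lockmyself2dot0/Evorl-s-PassGen | password.py | is_password_correct
-- ===== SOURCE A (Python) =====
-- from typing import List
--
-- def is_password_correct(password: str, char_list: List[str]) -> bool:
--     """ Проверка пароля на наличие символов из всех списков
--
--     Args:
--         password (str): пароль
--         char_list (List[str]): список словарей, знаки из которых надо использовать
--
--     Returns:
--         bool: правильный пароль или нет
--     """
--     for char in char_list:
--         is_correct = False
--         for value in char:
--             if value in password:
--                 is_correct = True
--                 break
--         if not is_correct:
--             return False
--     return True
-- ===== SOURCE B (Python) =====
-- def is_password_correct(password, char_list):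
--     """Index groups by character once, then one pass over the password discarding
--     satisfied groups from a live set of still-unsatisfied group indices."""
--     groups_of = {}
--     for i, group in enumerate(char_list):
--         for ch in group:
--             groups_of.setdefault(ch, set()).add(i)
--     remaining = set(range(len(char_list)))
--     for ch in password:
--         if not remaining:
--             break
--         remaining -= groups_of.get(ch, set())
--     return not remaining
-- ===== Notes on version B (the rewrite author's own statement) =====
-- stated objective: alternative
-- what changed: Instead of rescanning the password for every group, B builds a char-to-group-indices dictionary once and makes a single pass over the password, discarding satisfied groups from a live set of still-unsatisfied group indices (early exit once empty).
import Mathlib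
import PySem

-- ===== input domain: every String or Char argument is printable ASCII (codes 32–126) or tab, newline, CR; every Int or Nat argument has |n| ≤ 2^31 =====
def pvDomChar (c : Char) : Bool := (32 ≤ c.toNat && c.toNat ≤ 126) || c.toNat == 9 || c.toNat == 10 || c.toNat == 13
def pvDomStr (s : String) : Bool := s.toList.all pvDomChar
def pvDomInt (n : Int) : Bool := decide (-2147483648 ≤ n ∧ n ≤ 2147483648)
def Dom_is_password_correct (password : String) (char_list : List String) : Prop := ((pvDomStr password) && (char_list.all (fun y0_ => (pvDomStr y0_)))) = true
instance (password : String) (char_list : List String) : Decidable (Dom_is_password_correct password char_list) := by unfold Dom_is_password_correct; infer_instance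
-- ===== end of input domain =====

-- B: one pass over the password with a live set of still-unsatisfied group indices,
-- instead of A's rescan of the password for every group. Equal return value everywhere.

-- ===== PORT A =====
-- inner loop: 'for value in char: if value in password: is_correct = True; break'
def pvCheckGroup (password : List Char) : List Char → Bool
  | [] => false
  | v :: rest => if password.contains v then true else pvCheckGroup password rest

-- outer loop: 'for char in char_list: … if not is_correct: return False' / 'return True'
def pvGroupsLoop (password : List Char) : List String → Bool
  | [] => true
  | g :: rest => if !(pvCheckGroup password g.toList) then false else pvGroupsLoop password rest

def is_password_correct (password : String) (char_list : List String) : Bool :=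
  pvGroupsLoop password.toList char_list

-- ===== PORT B =====
-- inner: 'for ch in group: groups_of.setdefault(ch, set()).add(i)'
def pvAddGroup (i : Nat) : List Char → PySem.Dict Char (PySem.Set Nat) → PySem.Dict Char (PySem.Set Nat)
  | [], d => d
  | c :: cs, d => pvAddGroup i cs (d.modify c PySem.Set.empty (fun s => s.add i))

-- outer: 'for i, group in enumerate(char_list): …' (index carried as a Nat counter)
def pvBuildIdx : List String → Nat → PySem.Dict Char (PySem.Set Nat) → PySem.Dict Char (PySem.Set Nat)
  | [], _, d => d
  | g :: rest, i, d => pvBuildIdx rest (i + 1) (pvAddGroup i g.toList d)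

-- 'for ch in password: if not remaining: break; remaining -= groups_of.get(ch, set())'
def pvAltLoop (idx : PySem.Dict Char (PySem.Set Nat)) : List Char → PySem.Set Nat → PySem.Set Nat
  | [], remaining => remaining
  | c :: rest, remaining =>
      if remaining.isEmpty = true then remaining
      else pvAltLoop idx rest (PySem.Set.diff remaining (idx.getD c PySem.Set.empty))

def is_password_correct_alt (password : String) (char_list : List String) : Bool :=
  let idx := pvBuildIdx char_list 0 PySem.Dict.empty
  let remaining := pvAltLoop idx password.toList
      (PySem.Set.ofList (List.range char_list.length))
  remaining.isEmpty

-- ===== PRECONDITION & SPEC =====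
def Spec_is_password_correct (password : String) (char_list : List String) (out : Bool) : Prop := out = is_password_correct_alt password char_list
instance (password : String) (char_list : List String) (out : Bool) : Decidable (Spec_is_password_correct password char_list out) := by unfold Spec_is_password_correct; infer_instance

-- ===== CLAIM (what is proved, stated in full; the proofs are below) =====
def Claim_equal_is_password_correct : Prop := ∀ (password : String) (char_list : List String), Dom_is_password_correct password char_list → Spec_is_password_correct password char_list (is_password_correct password char_list)

-- ===== LEMMAS AND PROOFS =====

-- ===== VERDICT (by name: the statement is the Claim_ definition above) =====
theorem pvCheckGroup_eq_any (p g : List Char) :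
    pvCheckGroup p g = g.any (fun v => p.contains v) := by
  induction g with
  | nil => rfl
  | cons v rest ih => by_cases h : v ∈ p <;> simp [pvCheckGroup, h, ih]

theorem pvGroupsLoop_eq_all (p : List Char) (cl : List String) :
    pvGroupsLoop p cl = cl.all (fun g => pvCheckGroup p g.toList) := by
  induction cl with
  | nil => rfl
  | cons g rest ih =>
      simp only [pvGroupsLoop, ih, List.all_cons]
      by_cases h : pvCheckGroup p g.toList = true <;> simp [h]


theorem pvAddGroup_mem (i j : Nat) (c : Char) (cs : List Char)
    (d : PySem.Dict Char (PySem.Set Nat)) :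
    j ∈ (pvAddGroup i cs d).getD c PySem.Set.empty
      ↔ j ∈ d.getD c PySem.Set.empty ∨ (c ∈ cs ∧ j = i) := by
  induction cs generalizing d with
  | nil => simp [pvAddGroup]
  | cons c' rest ih =>
      rw [pvAddGroup, ih]
      by_cases h : c = c'
      · subst h
        rw [PySem.Dict.getD_modify_self]
        simp only [PySem.Set.mem_add, List.mem_cons]
        tauto
      · rw [PySem.Dict.getD_modify, if_neg h]
        simp only [List.mem_cons]
        tauto

theorem pvBuildIdx_mem (gs : List String) (i j : Nat) (c : Char)
    (d : PySem.Dict Char (PySem.Set Nat)) :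
    j ∈ (pvBuildIdx gs i d).getD c PySem.Set.empty
      ↔ j ∈ d.getD c PySem.Set.empty
        ∨ ∃ (k : Nat) (h : k < gs.length), c ∈ (gs[k]'h).toList ∧ j = i + k := by
  induction gs generalizing i d with
  | nil => simp [pvBuildIdx]
  | cons g rest ih =>
      rw [pvBuildIdx, ih, pvAddGroup_mem]
      constructor
      · rintro ((hd | ⟨hc, rfl⟩) | ⟨k, hk, hc, rfl⟩)
        · exact Or.inl hd
        · exact Or.inr ⟨0, by simp, by simpa using hc, by omega⟩
        · exact Or.inr ⟨k + 1, by simpa using hk, by simpa using hc, by omega⟩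
      · rintro (hd | ⟨k, hk, hc, rfl⟩)
        · exact Or.inl (Or.inl hd)
        · cases k with
          | zero => exact Or.inl (Or.inr ⟨by simpa using hc, by omega⟩)
          | succ k => exact Or.inr ⟨k, by simpa using hk, by simpa using hc, by omega⟩

theorem pvAltLoop_mem (idx : PySem.Dict Char (PySem.Set Nat)) (cs : List Char)
    (rem : PySem.Set Nat) (x : Nat) :
    x ∈ pvAltLoop idx cs rem
      ↔ x ∈ rem ∧ ∀ c ∈ cs, x ∉ idx.getD c PySem.Set.empty := by
  induction cs generalizing rem with
  | nil => simp [pvAltLoop]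
  | cons c rest ih =>
      by_cases h : rem.isEmpty
      · have : rem = [] := by simpa [List.isEmpty_iff] using h
        subst this; simp [pvAltLoop]
      · rw [pvAltLoop, if_neg h, ih]
        simp only [PySem.Set.mem_diff, List.mem_cons]
        constructor
        · rintro ⟨⟨hx, hnc⟩, hrest⟩
          exact ⟨hx, fun c' hc' => by rcases hc' with rfl | hc' <;> [exact hnc; exact hrest c' hc']⟩
        · rintro ⟨hx, hall⟩
          exact ⟨⟨hx, hall c (Or.inl rfl)⟩, fun c' hc' => hall c' (Or.inr hc')⟩

theorem pv_sat_iff (p : List Char) (g : String) :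
    (pvCheckGroup p g.toList = true) ↔ ∃ c ∈ p, c ∈ g.toList := by
  rw [pvCheckGroup_eq_any]
  simp only [List.any_eq_true, List.contains_iff_mem]
  exact ⟨fun ⟨v, hv, hp⟩ => ⟨v, by simpa using hp, hv⟩, fun ⟨c, hc, hg⟩ => ⟨c, hg, by simpa using hc⟩⟩

theorem is_password_correct_spec : Claim_equal_is_password_correct := by
  intro password char_list _
  unfold Spec_is_password_correct
  unfold is_password_correct is_password_correct_alt
  rw [pvGroupsLoop_eq_all, Bool.eq_iff_iff]
  simp only [List.all_eq_true, List.isEmpty_iff, List.eq_nil_iff_forall_not_mem]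
  constructor
  · intro h x hx
    rw [pvAltLoop_mem] at hx
    obtain ⟨hxr, hall⟩ := hx
    have hxn : x < char_list.length := by
      simpa [PySem.Set.mem_ofList, List.mem_range] using hxr
    have := h (char_list[x]'hxn) (List.getElem_mem hxn)
    rw [pv_sat_iff] at this
    obtain ⟨c, hc, hg⟩ := this
    refine hall c hc ?_
    rw [pvBuildIdx_mem]
    exact Or.inr ⟨x, hxn, hg, by omega⟩
  · intro h g hg
    obtain ⟨i, hi, rfl⟩ := List.getElem_of_mem hg
    rw [pv_sat_iff]
    by_contra hno
    push Not at hno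
    refine h i ?_
    rw [pvAltLoop_mem]
    refine ⟨by simp [PySem.Set.mem_ofList, List.mem_range, hi], ?_⟩
    intro c hc hmem
    rw [pvBuildIdx_mem] at hmem
    rcases hmem with hd | ⟨k, hk, hck, hik⟩
    · simp [PySem.Dict.getD_empty] at hd
    · have : k = i := by omega
      subst this
      exact hno c hc hck
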